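-- pv_equiv track=rewrite | github.com/synqing/Vision-Layer | vision/parserd/core/models.py | flatten_lines
-- ===== SOURCE A (Python) =====
-- from typing import Any, Dict, List, Optional
--
-- def flatten_lines(lines: List[str]) -> List[str]:
--     out: List[str] = []
--     for line in lines:
--         if line is None:
--             continue
--         parts = str(line).split("\n")
--         for part in parts:
--             stripped = part.strip()
--             if stripped:
--                 out.append(stripped)
--     return out
-- ===== SOURCE B (Python) =====
-- from typing import List
--
--
-- def flatten_lines(lines: List[str]) -> List[str]:
--     # Character-level state machine: no split(), no strip(). `word` holds the
--     # stripped content so far, `pend` holds whitespace that is only committed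
--     # if more non-whitespace follows; a '\n' sentinel per line flushes the word.
--     out: List[str] = []
--     word: List[str] = []
--     pend: List[str] = []
--     for line in lines:
--         if line is None:
--             continue
--         for ch in str(line) + "\n":
--             if ch == "\n":
--                 if word:
--                     out.append("".join(word))
--                 word = []
--                 pend = []
--             elif ch.isspace():
--                 if word:
--                     pend.append(ch)
--             else:
--                 word.extend(pend)
--                 pend = []
--                 word.append(ch)
--     return out
-- ===== Notes on version B (the rewrite author's own statement) =====
-- stated objective: alternative
-- what changed: Replaces A's per-line split('\n') plus per-part strip() by a single character-level state machine that scans every character once, keeping a word buffer and a pending-whitespace buffer and flushing the word at each '\n' or end of line; no split or strip is used at all.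
import Mathlib
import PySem

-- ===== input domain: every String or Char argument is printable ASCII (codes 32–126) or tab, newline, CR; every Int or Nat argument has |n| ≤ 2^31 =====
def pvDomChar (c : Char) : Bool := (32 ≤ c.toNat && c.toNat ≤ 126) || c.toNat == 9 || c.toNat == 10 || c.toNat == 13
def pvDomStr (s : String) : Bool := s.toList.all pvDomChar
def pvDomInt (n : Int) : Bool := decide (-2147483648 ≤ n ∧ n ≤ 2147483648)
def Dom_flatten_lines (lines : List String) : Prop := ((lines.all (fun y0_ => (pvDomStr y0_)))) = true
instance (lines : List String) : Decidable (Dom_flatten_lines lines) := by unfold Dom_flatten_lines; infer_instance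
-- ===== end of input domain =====

-- B replaces A's split-then-strip per line by a single character-level state machine
-- (word buffer + pending-whitespace buffer, flushed at '\n' / end of line); objective: alternative.


-- ===== PORT A =====
-- 'if line is None: continue' never fires (arguments are typed strings), and str(line) = line.
def flatten_lines (lines : List String) : List String :=
  lines.foldl (fun out line =>
    let parts := (PySem.Str.split? line "\n").getD []   -- sep "\n" ≠ "", so split? is always `some`
    parts.foldl (fun out part =>
      let stripped := PySem.Str.strip part
      if stripped ≠ "" then out ++ [stripped] else out) out) []

-- ===== PORT B =====
-- the body of B's inner character loop: state = (out, word, pend)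
def pvStep (st : List String × List Char × List Char) (ch : Char) :
    List String × List Char × List Char :=
  if ch = '\n' then
    ((if st.2.1 ≠ [] then st.1 ++ [String.ofList st.2.1] else st.1), [], [])
  else if PySem.Chars.isspace ch then
    (st.1, st.2.1, if st.2.1 ≠ [] then st.2.2 ++ [ch] else st.2.2)
  else
    (st.1, st.2.1 ++ st.2.2 ++ [ch], [])

def flatten_lines_alt (lines : List String) : List String :=
  (lines.foldl (fun st line => (line.toList ++ ['\n']).foldl pvStep st)
    (([] : List String), ([] : List Char), ([] : List Char))).1

-- ===== PRECONDITION & SPEC =====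
def Spec_flatten_lines (lines : List String) (out : List String) : Prop := out = flatten_lines_alt lines
instance (lines : List String) (out : List String) : Decidable (Spec_flatten_lines lines out) := by unfold Spec_flatten_lines; infer_instance

-- ===== CLAIM (what is proved, stated in full; the proofs are below) =====
def Claim_equal_flatten_lines : Prop := ∀ (lines : List String), Dom_flatten_lines lines → Spec_flatten_lines lines (flatten_lines lines)

-- ===== LEMMAS AND PROOFS =====

-- the common normal form of both ports
def pvEmit (parts : List (List Char)) : List String :=
  (parts.filter (fun p => PySem.Chars.strip p ≠ [])).map (fun p => String.ofList (PySem.Chars.strip p))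

-- PySem's fuel-based single-char splitOn agrees with Mathlib's List.splitOn.
theorem pySplitOn_go_single (c : Char) (fuel : Nat) (l cur : List Char) (acc : List (List Char))
    (h : l.length ≤ fuel) :
    PySem.Chars.splitOn.go [c] fuel l cur acc =
      acc.reverse ++ (cur.reverse ++ (List.splitOn c l).headI) :: (List.splitOn c l).tail := by
  induction fuel generalizing l cur acc with
  | zero =>
      have hl : l = [] := List.eq_nil_of_length_eq_zero (Nat.le_zero.mp h)
      subst hl
      simp [PySem.Chars.splitOn.go, List.splitOn, List.splitOnP_nil]
  | succ fuel ih =>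
      cases l with
      | nil => simp [PySem.Chars.splitOn.go, List.splitOn, List.splitOnP_nil]
      | cons c' rest =>
          obtain ⟨hd, tl, hsp⟩ := List.exists_cons_of_ne_nil (List.splitOnP_ne_nil (fun x => x == c) rest)
          have hc' : ∀ (h : c' ≠ c), ¬ c = c' := fun h hh => h hh.symm
          by_cases hc : c' = c
          · have hpre : List.isPrefixOf [c] (c' :: rest) = true := by
              simp [List.isPrefixOf, hc]
            rw [PySem.Chars.splitOn.go]
            simp only [hpre, if_pos]
            rw [ih ((c' :: rest).drop [c].length) [] (cur.reverse :: acc)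
              (by simpa using Nat.le_of_succ_le_succ h)]
            simp [List.splitOn, List.splitOnP_cons, hsp, hc]
          · have hpre : List.isPrefixOf [c] (c' :: rest) = false := by
              simp [List.isPrefixOf, hc' hc]
            rw [PySem.Chars.splitOn.go]
            simp only [hpre, Bool.false_eq_true, if_neg, not_false_iff]
            rw [ih rest (c' :: cur) acc (by simpa using Nat.le_of_succ_le_succ h)]
            simp [List.splitOn, List.splitOnP_cons, hsp, hc]

theorem pySplitOn_single (c : Char) (s : List Char) :
    PySem.Chars.splitOn s [c] = List.splitOn c s := by
  obtain ⟨hd, tl, hsp⟩ := List.exists_cons_of_ne_nil (List.splitOnP_ne_nil (fun x => x == c) s)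
  unfold PySem.Chars.splitOn
  rw [pySplitOn_go_single c (s.length + 1) s [] [] (by omega)]
  simp [List.splitOn, hsp]

-- splitOn of a cons, boundary and non-boundary character
theorem splitOn_cons_sep (t : List Char) :
    List.splitOn '\n' ('\n' :: t) = [] :: List.splitOn '\n' t := by
  obtain ⟨hd, tl, hsp⟩ := List.exists_cons_of_ne_nil (List.splitOnP_ne_nil (fun x => x == '\n') t)
  simp [List.splitOn, List.splitOnP_cons, hsp]

theorem splitOn_cons_ne (c : Char) (t : List Char) (hc : c ≠ '\n') :
    List.splitOn '\n' (c :: t)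
      = (c :: (List.splitOn '\n' t).headI) :: (List.splitOn '\n' t).tail := by
  obtain ⟨hd, tl, hsp⟩ := List.exists_cons_of_ne_nil (List.splitOnP_ne_nil (fun x => x == '\n') t)
  have : ¬ ('\n' = c) := fun h => hc h.symm
  simp [List.splitOn, List.splitOnP_cons, hsp, hc]

-- the inner per-line loop of A appends the stripped non-empty parts
theorem inner_foldl (parts : List String) (out : List String) :
    parts.foldl (fun out part =>
      let stripped := PySem.Str.strip part
      if stripped ≠ "" then out ++ [stripped] else out) out
    = out ++ (parts.filter (fun q => PySem.Str.strip q ≠ "")).map PySem.Str.strip := by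
  induction parts generalizing out with
  | nil => simp
  | cons q t ih =>
    simp only [List.foldl_cons]
    rw [ih]
    by_cases hq : PySem.Str.strip q = "" <;> simp [hq]

theorem strip_ofList (p : List Char) :
    PySem.Str.strip (String.ofList p) = String.ofList (PySem.Chars.strip p) := by
  simp [PySem.Str.strip]

theorem strmap_emit (ps : List (List Char)) :
    ((ps.map String.ofList).filter (fun q => PySem.Str.strip q ≠ "")).map PySem.Str.strip
      = pvEmit ps := by
  induction ps with
  | nil => rfl
  | cons p t ih =>
    by_cases hp : PySem.Chars.strip p = [] <;>
      simp [pvEmit, strip_ofList, hp, String.ofList_eq_empty_iff] <;>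
      simpa [pvEmit] using ih

theorem split_parts (line : String) :
    (PySem.Str.split? line "\n").getD []
      = (List.splitOn '\n' line.toList).map String.ofList := by
  have h : ("\n" : String).toList = ['\n'] := by decide
  simp [PySem.Str.split?, PySem.Chars.split?, h, pySplitOn_single]

-- A's loop body, named so the accumulator induction can rewrite it
def aBody (out : List String) (line : String) : List String :=
  ((PySem.Str.split? line "\n").getD []).foldl (fun out part =>
    let stripped := PySem.Str.strip part
    if stripped ≠ "" then out ++ [stripped] else out) out

theorem aBody_eq (out : List String) (line : String) :
    aBody out line = out ++ pvEmit (List.splitOn '\n' line.toList) := by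
  unfold aBody
  rw [split_parts, inner_foldl, strmap_emit]

theorem a_aux (lines : List String) (out : List String) :
    lines.foldl aBody out
      = out ++ pvEmit (lines.flatMap (fun line => List.splitOn '\n' line.toList)) := by
  induction lines generalizing out with
  | nil => simp [pvEmit]
  | cons l t ih =>
    rw [List.foldl_cons, aBody_eq, ih]
    simp [pvEmit, List.filter_append, List.append_assoc]

theorem a_eq (lines : List String) :
    flatten_lines lines = pvEmit (lines.flatMap (fun line => List.splitOn '\n' line.toList)) := by
  have h : flatten_lines lines = lines.foldl aBody [] := rfl
  rw [h, a_aux]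
  simp

-- ===== B-side: the state machine computes strip =====

-- the (word) component of the machine over a '\n'-free stretch
def scanW (w p : List Char) : List Char → List Char
  | [] => w
  | c :: t =>
      if PySem.Chars.isspace c then
        scanW w (if w ≠ [] then p ++ [c] else p) t
      else
        scanW (w ++ p ++ [c]) [] t

def emitW (w : List Char) : List String :=
  if w ≠ [] then [String.ofList w] else []

theorem pvEmit_cons (s : List Char) (r : List (List Char)) :
    pvEmit (s :: r) = emitW (PySem.Chars.strip s) ++ pvEmit r := by
  by_cases h : PySem.Chars.strip s = [] <;> simp [pvEmit, emitW, h]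

theorem pvEmit_append (a b : List (List Char)) :
    pvEmit (a ++ b) = pvEmit a ++ pvEmit b := by
  simp [pvEmit, List.filter_append]

theorem splitOn_nl_ne_nil (l : List Char) : List.splitOn '\n' l ≠ [] := by
  simp only [List.splitOn]
  exact List.splitOnP_ne_nil _ l

theorem headI_cons_tail {α : Type} [Inhabited α] (L : List α) (h : L ≠ []) : L.headI :: L.tail = L := by
  cases L with
  | nil => exact absurd rfl h
  | cons a t => rfl

theorem pvEmit_splitOn (l : List Char) :
    pvEmit (List.splitOn '\n' l)
      = emitW (PySem.Chars.strip (List.splitOn '\n' l).headI)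
          ++ pvEmit (List.splitOn '\n' l).tail := by
  rw [← pvEmit_cons, headI_cons_tail _ (splitOn_nl_ne_nil l)]

-- rstrip distributes over an append ending in a non-space character
theorem rstrip_append (p t : List Char) (c : Char) (hc : PySem.Chars.isspace c = false) :
    PySem.Chars.rstrip (p ++ c :: t) = p ++ c :: PySem.Chars.rstrip t := by
  unfold PySem.Chars.rstrip
  rw [List.reverse_append, List.reverse_cons, List.append_assoc, List.dropWhile_append]
  by_cases h : (List.dropWhile PySem.Chars.isspace t.reverse) = [] <;>
    simp [h, hc]

theorem rstrip_spaces (p : List Char) (hp : ∀ x ∈ p, PySem.Chars.isspace x = true) :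
    PySem.Chars.rstrip p = [] := by
  unfold PySem.Chars.rstrip
  have : List.dropWhile PySem.Chars.isspace p.reverse = [] := by
    rw [List.dropWhile_eq_nil_iff]
    intro x hx
    exact hp x (List.mem_reverse.mp hx)
  simp [this]

-- a started word: the machine appends p ++ s with trailing whitespace removed
theorem scanW_started (s : List Char) (w p : List Char) (hw : w ≠ [])
    (hp : ∀ x ∈ p, PySem.Chars.isspace x = true) :
    scanW w p s = w ++ PySem.Chars.rstrip (p ++ s) := by
  induction s generalizing w p with
  | nil => simp [scanW, rstrip_spaces p hp]
  | cons c t ih =>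
    by_cases hc : PySem.Chars.isspace c = true
    · rw [scanW, if_pos hc, if_pos hw, ih _ (p ++ [c]) hw (by
        intro x hx
        rcases List.mem_append.mp hx with h | h
        · exact hp x h
        · simpa [List.mem_singleton.mp h] using hc)]
      simp
    · rw [scanW, if_neg (by simp [hc]),
        ih (w ++ p ++ [c]) [] (by simp) (by intro x hx; cases hx),
        rstrip_append p t c (by simpa using hc)]
      simp

-- from the empty state the machine computes Python's strip
theorem scanW_strip (s : List Char) : scanW [] [] s = PySem.Chars.strip s := by
  induction s with
  | nil => rfl
  | cons c t ih =>
    by_cases hc : PySem.Chars.isspace c = true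
    · rw [scanW, if_pos hc]
      simp only [ne_eq, not_true_eq_false, reduceIte]
      rw [ih]
      simp [PySem.Chars.strip, PySem.Chars.lstrip, hc]
    · rw [scanW, if_neg (by simp [hc])]
      simp only [List.nil_append]
      rw [scanW_started t [c] [] (by simp) (by intro x hx; cases hx)]
      have hr : PySem.Chars.strip (c :: t) = PySem.Chars.rstrip (c :: t) := by
        simp [PySem.Chars.strip, PySem.Chars.lstrip, hc]
      rw [hr, show (c :: t) = [] ++ c :: t from rfl, rstrip_append [] t c (by simpa using hc)]
      simp

-- one line (its chars followed by the '\n' sentinel) through the machine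
theorem fold_line (l : List Char) (out : List String) (w p : List Char) :
    (l ++ ['\n']).foldl pvStep (out, w, p)
      = (out ++ emitW (scanW w p (List.splitOn '\n' l).headI)
            ++ pvEmit (List.splitOn '\n' l).tail, [], []) := by
  induction l generalizing out w p with
  | nil =>
    by_cases hw : w = [] <;>
      simp [pvStep, emitW, scanW, pvEmit, List.splitOn, List.splitOnP_nil, hw]
  | cons c t ih =>
    by_cases hc : c = '\n'
    · subst hc
      have h1 : pvStep (out, w, p) '\n' = (out ++ emitW w, [], []) := by
        by_cases hw : w = [] <;> simp [pvStep, emitW, hw]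
      rw [List.cons_append, List.foldl_cons, h1, ih, splitOn_cons_sep]
      simp only [List.headI_cons, List.tail_cons, scanW, scanW_strip]
      rw [pvEmit_splitOn t]
      simp [List.append_assoc]
    · rw [List.cons_append, List.foldl_cons, splitOn_cons_ne c t hc]
      by_cases hs : PySem.Chars.isspace c = true
      · have h1 : pvStep (out, w, p) c = (out, w, if w ≠ [] then p ++ [c] else p) := by
          simp [pvStep, hc, hs]
        rw [h1, ih]
        simp only [List.headI_cons, List.tail_cons, scanW, hs, if_pos]
      · have h1 : pvStep (out, w, p) c = (out, w ++ p ++ [c], []) := by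
          simp [pvStep, hc, hs]
        rw [h1, ih]
        simp only [List.headI_cons, List.tail_cons, scanW, hs]
        simp

theorem b_aux (lines : List String) (out : List String) :
    lines.foldl (fun st line => (line.toList ++ ['\n']).foldl pvStep st) (out, [], [])
      = (out ++ pvEmit (lines.flatMap (fun line => List.splitOn '\n' line.toList)), [], []) := by
  induction lines generalizing out with
  | nil => simp [pvEmit]
  | cons l t ih =>
    rw [List.foldl_cons, fold_line, ih]
    rw [List.flatMap_cons, pvEmit_append, pvEmit_splitOn, scanW_strip]
    simp [List.append_assoc]

theorem b_eq (lines : List String) :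
    flatten_lines_alt lines
      = pvEmit (lines.flatMap (fun line => List.splitOn '\n' line.toList)) := by
  unfold flatten_lines_alt
  rw [b_aux]
  simp

-- ===== VERDICT (by name: the statement is the Claim_ definition above) =====
theorem flatten_lines_spec : Claim_equal_flatten_lines := by
  intro lines _
  unfold Spec_flatten_lines
  rw [a_eq, b_eq]
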